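-- pv_equiv track=rewrite | github.com/mnemos-dev/mnemos | mnemos/normalizer.py | _merge_consecutive_assistant
-- ===== SOURCE A (Python) =====
-- def _merge_consecutive_assistant(pairs: list[tuple[str, str]]) -> list[tuple[str, str]]:
--     """Merge consecutive assistant messages into one."""
--     if not pairs:
--         return pairs
--     merged: list[tuple[str, str]] = []
--     for role, text in pairs:
--         if merged and merged[-1][0] == "assistant" and role == "assistant":
--             prev_role, prev_text = merged[-1]
--             merged[-1] = (prev_role, prev_text + "\n" + text)
--         else:
--             merged.append((role, text))
--     return merged
-- ===== SOURCE B (Python) =====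
-- def _merge_consecutive_assistant(pairs: list[tuple[str, str]]) -> list[tuple[str, str]]:
--     """Merge consecutive assistant messages into one (run-splitting version)."""
--     if not pairs:
--         return pairs
--     out: list[tuple[str, str]] = []
--     i, n = 0, len(pairs)
--     while i < n:
--         role = pairs[i][0]
--         j = i
--         while j < n and pairs[j][0] == role:
--             j += 1
--         if role == "assistant":
--             out.append(("assistant", "\n".join(t for _, t in pairs[i:j])))
--         else:
--             out.extend(pairs[i:j])
--         i = j
--     return out
-- ===== Notes on version B (the rewrite author's own statement) =====
-- stated objective: alternative
-- what changed: B scans maximal consecutive runs of equal role and joins each assistant run with a single '\n'.join, instead of A's fold that repeatedly rewrites the last element of the accumulator.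
import Mathlib
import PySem

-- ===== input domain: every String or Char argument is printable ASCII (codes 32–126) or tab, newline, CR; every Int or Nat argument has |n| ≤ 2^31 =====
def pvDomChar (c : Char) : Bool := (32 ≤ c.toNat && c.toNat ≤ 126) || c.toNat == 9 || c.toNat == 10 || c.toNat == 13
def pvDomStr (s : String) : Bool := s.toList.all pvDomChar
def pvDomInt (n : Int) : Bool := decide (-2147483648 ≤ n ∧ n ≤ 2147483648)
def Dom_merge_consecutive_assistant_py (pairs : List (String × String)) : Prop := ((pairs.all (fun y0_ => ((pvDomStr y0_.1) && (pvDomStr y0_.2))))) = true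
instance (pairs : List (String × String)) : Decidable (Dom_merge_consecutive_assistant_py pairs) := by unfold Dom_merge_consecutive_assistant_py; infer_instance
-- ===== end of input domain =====

-- B merges assistant messages by scanning maximal consecutive equal-role runs and joining each
-- assistant run once, instead of A's fold that repeatedly rewrites the accumulator's last element
-- (objective: alternative; same cost).

-- ===== PORT A =====
-- loop body of A's `for role, text in pairs` loop
def pvStepA (merged : List (String × String)) (rt : String × String) : List (String × String) :=
  if merged ≠ [] ∧ (merged.getLastD ("", "")).1 = "assistant" ∧ rt.1 = "assistant" then
    -- merged[-1] = (prev_role, prev_text + "\n" + text)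
    merged.dropLast ++ [((merged.getLastD ("", "")).1, (merged.getLastD ("", "")).2 ++ "\n" ++ rt.2)]
  else
    merged ++ [rt]

def merge_consecutive_assistant_py (pairs : List (String × String)) : List (String × String) :=
  if pairs = [] then pairs
  else pairs.foldl pvStepA []

-- ===== PORT B =====
-- inner while loop of Source B: texts of the maximal leading run with role `r`, and the remainder
def pvTakeRun (r : String) : List (String × String) → List String × List (String × String)
  | [] => ([], [])
  | (r2, t) :: rest =>
    if r2 = r then
      let p := pvTakeRun r rest
      (t :: p.1, p.2)
    else ([], (r2, t) :: rest)

theorem pvTakeRun_length (r : String) (l : List (String × String)) :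
    (pvTakeRun r l).2.length ≤ l.length := by
  induction l with
  | nil => simp [pvTakeRun]
  | cons x rest ih =>
    obtain ⟨r2, t⟩ := x
    by_cases h : r2 = r <;> simp [pvTakeRun, h]; omega

-- outer while loop of Source B: one iteration per run
def pvGroups : List (String × String) → List (String × String)
  | [] => []
  | (r, t) :: rest =>
    let p := pvTakeRun r rest
    (if r = "assistant" then [("assistant", String.intercalate "\n" (t :: p.1))]
     else (r, t) :: p.1.map (fun x => (r, x))) ++ pvGroups p.2
termination_by l => l.length
decreasing_by
  have := pvTakeRun_length r rest
  simp
  omega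

def merge_consecutive_assistant_py_alt (pairs : List (String × String)) : List (String × String) :=
  if pairs = [] then pairs
  else pvGroups pairs

-- ===== PRECONDITION & SPEC =====
def Spec_merge_consecutive_assistant_py (pairs : List (String × String)) (out : List (String × String)) : Prop := out = merge_consecutive_assistant_py_alt pairs
instance (pairs : List (String × String)) (out : List (String × String)) : Decidable (Spec_merge_consecutive_assistant_py pairs out) := by unfold Spec_merge_consecutive_assistant_py; infer_instance

-- ===== CLAIM (what is proved, stated in full; the proofs are below) =====
def Claim_equal_merge_consecutive_assistant_py : Prop := ∀ (pairs : List (String × String)), Dom_merge_consecutive_assistant_py pairs → Spec_merge_consecutive_assistant_py pairs (merge_consecutive_assistant_py pairs)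

-- ===== LEMMAS AND PROOFS =====

-- A's fold never touches elements strictly before a nonempty suffix of the accumulator
theorem foldl_pvStepA_append (l : List (String × String)) :
    ∀ (acc b : List (String × String)), b ≠ [] →
      List.foldl pvStepA (acc ++ b) l = acc ++ List.foldl pvStepA b l := by
  induction l with
  | nil => intro acc b hb; simp
  | cons x rest ih =>
    intro acc b hb
    have hlast : (acc ++ b).getLastD ("", "") = b.getLastD ("", "") := by
      cases b with
      | nil => exact absurd rfl hb
      | cons y ys =>
        rw [List.getLastD_eq_getLast?, List.getLastD_eq_getLast?,
            List.getLast?_append_of_ne_nil acc (l₂ := y :: ys) (by simp)]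
    have hdrop : (acc ++ b).dropLast = acc ++ b.dropLast := List.dropLast_append_of_ne_nil hb
    simp only [List.foldl_cons, pvStepA, hlast, hdrop]
    by_cases hc : (acc ++ b ≠ [] ∧ (b.getLastD ("", "")).1 = "assistant" ∧ x.1 = "assistant")
    · have hc' : (b ≠ [] ∧ (b.getLastD ("", "")).1 = "assistant" ∧ x.1 = "assistant") := ⟨hb, hc.2⟩
      rw [if_pos hc, if_pos hc', List.append_assoc]
      exact ih acc _ (by simp)
    · have hc' : ¬ (b ≠ [] ∧ (b.getLastD ("", "")).1 = "assistant" ∧ x.1 = "assistant") := by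
        intro h; exact hc ⟨by simp [hb], h.2⟩
      rw [if_neg hc, if_neg hc', List.append_assoc]
      exact ih acc _ (by simp)

-- a fold started on a single non-assistant element just keeps it in front
theorem foldl_pvStepA_nonassistant (r t : String) (hr : r ≠ "assistant")
    (l : List (String × String)) :
    List.foldl pvStepA [(r, t)] l = (r, t) :: List.foldl pvStepA [] l := by
  cases l with
  | nil => simp
  | cons x rest =>
    have h1 : pvStepA [(r, t)] x = [(r, t), x] := by
      simp [pvStepA, hr]
    have h2 : pvStepA [] x = [x] := by simp [pvStepA]
    simp only [List.foldl_cons, h1, h2]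
    exact foldl_pvStepA_append rest [(r, t)] [x] (by simp)

-- emitting a non-assistant run element-by-element is the same as grouping the whole list
theorem pvGroups_run (r : String) (hr : r ≠ "assistant") (l : List (String × String)) :
    (pvTakeRun r l).1.map (fun x => (r, x)) ++ pvGroups (pvTakeRun r l).2 = pvGroups l := by
  cases l with
  | nil => simp [pvTakeRun, pvGroups]
  | cons x rest =>
    obtain ⟨r2, t⟩ := x
    by_cases h : r2 = r
    · subst h
      simp [pvTakeRun, pvGroups, hr]
    · simp [pvTakeRun, h]

theorem pvGroups_cons_nonassistant (r t : String) (hr : r ≠ "assistant")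
    (l : List (String × String)) :
    pvGroups ((r, t) :: l) = (r, t) :: pvGroups l := by
  rw [pvGroups, if_neg hr]
  simp only [List.cons_append]
  rw [pvGroups_run r hr l]

-- the main invariant: A's fold from the empty accumulator computes B's run grouping, and a fold
-- whose accumulator is a single open assistant message absorbs the leading assistant run
theorem pv_main (l : List (String × String)) :
    List.foldl pvStepA [] l = pvGroups l ∧
    ∀ t, List.foldl pvStepA [("assistant", t)] l =
      ("assistant", String.intercalate "\n" (t :: (pvTakeRun "assistant" l).1)) ::
        pvGroups (pvTakeRun "assistant" l).2 := by
  induction l with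
  | nil =>
    refine ⟨by simp [pvGroups], fun t => ?_⟩
    simp [pvTakeRun, pvGroups]
    rfl
  | cons x rest ih =>
    obtain ⟨r, t⟩ := x
    have hstep0 : List.foldl pvStepA [] ((r, t) :: rest) = List.foldl pvStepA [(r, t)] rest := by
      simp [pvStepA]
    have h1 : List.foldl pvStepA [] ((r, t) :: rest) = pvGroups ((r, t) :: rest) := by
      by_cases hr : r = "assistant"
      · subst hr
        rw [hstep0, ih.2 t, pvGroups, if_pos rfl]
        simp
      · rw [hstep0, foldl_pvStepA_nonassistant r t hr rest, ih.1,
            pvGroups_cons_nonassistant r t hr rest]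
    refine ⟨h1, fun s => ?_⟩
    by_cases hr : r = "assistant"
    · subst hr
      have hs : pvStepA [("assistant", s)] ("assistant", t) =
          [("assistant", s ++ "\n" ++ t)] := by simp [pvStepA]
      have hj : String.intercalate "\n" ((s ++ "\n" ++ t) :: (pvTakeRun "assistant" rest).1)
          = String.intercalate "\n" (s :: t :: (pvTakeRun "assistant" rest).1) := rfl
      simp only [List.foldl_cons, hs]
      rw [ih.2 (s ++ "\n" ++ t), hj]
      simp [pvTakeRun]
    · have hs : pvStepA [("assistant", s)] (r, t) = [("assistant", s), (r, t)] := by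
        simp [pvStepA, hr]
      have hrun : pvTakeRun "assistant" ((r, t) :: rest) = ([], (r, t) :: rest) := by
        simp [pvTakeRun, hr]
      have happ := foldl_pvStepA_append rest [("assistant", s)] [(r, t)] (by simp)
      simp only [List.cons_append, List.nil_append] at happ
      simp only [List.foldl_cons, hs]
      rw [happ, hrun]
      have : List.foldl pvStepA [(r, t)] rest = pvGroups ((r, t) :: rest) := by
        rw [← hstep0]; exact h1
      rw [this]
      rfl

-- ===== VERDICT (by name: the statement is the Claim_ definition above) =====
theorem merge_consecutive_assistant_py_spec : Claim_equal_merge_consecutive_assistant_py := by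
  intro pairs _
  unfold Spec_merge_consecutive_assistant_py merge_consecutive_assistant_py
    merge_consecutive_assistant_py_alt
  by_cases h : pairs = []
  · simp [h]
  · simp only [if_neg h]
    exact (pv_main pairs).1
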